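-- pv_equiv track=rewrite | github.com/yinmaybe/Machine_learning | ML_zhouzhihua/Ch4_DecisionTree/ID3.py | is_cont_split
-- ===== SOURCE A (Python) =====
-- def is_cont_split(subdata):
--     l = len(subdata)
--     c = len(subdata[0]) #列数
--     split = True
--     for i in range(l):
--         num1 = 0
--         num2 = 0
--         label = subdata[0][c - 1]
--         one_row = subdata[0]
--         for row in range(l):
--             if subdata[row] == one_row:
--                 num1 += 1
--             if subdata[row][c - 1] == label:
--                 num2 += 1
--         if num1 == l or num2 == l:
--             # 不可分 标明类别
--             split = False
--     return split
-- ===== SOURCE B (Python) =====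
-- def is_cont_split(subdata):
--     first = subdata[0]
--     label = first[len(first) - 1]
--     return any(row[len(first) - 1] != label for row in subdata)
-- ===== Notes on version B (the rewrite author's own statement) =====
-- stated objective: simpler
-- what changed: Replaced the nested O(l^2) whole-row and label counting (the all-rows-identical count is subsumed by the all-labels-identical count) and the redundant outer loop by a single short-circuiting scan comparing each row's last column to the first row's label.
import Mathlib
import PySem

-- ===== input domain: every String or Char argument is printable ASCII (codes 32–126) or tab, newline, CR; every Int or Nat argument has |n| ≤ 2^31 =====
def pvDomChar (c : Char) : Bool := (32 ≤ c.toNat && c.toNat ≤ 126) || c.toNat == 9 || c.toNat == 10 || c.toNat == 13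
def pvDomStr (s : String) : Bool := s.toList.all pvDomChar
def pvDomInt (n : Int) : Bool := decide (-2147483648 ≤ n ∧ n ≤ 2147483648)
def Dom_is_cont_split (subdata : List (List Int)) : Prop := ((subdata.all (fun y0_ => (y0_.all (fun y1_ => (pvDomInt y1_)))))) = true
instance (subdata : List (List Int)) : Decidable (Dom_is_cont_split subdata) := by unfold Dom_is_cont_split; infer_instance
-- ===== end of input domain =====

-- B replaces A's nested quadratic counting by one short-circuiting scan of the last column (simpler, and asymptotically faster).

-- ===== PORT A =====
def is_cont_split (subdata : List (List Int)) : Bool :=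
  let l : Int := subdata.length
  let c : Int := (PySem.List.pyGetD subdata 0 []).length
  (PySem.List.pyRange 0 l 1).foldl (fun split _i =>
    let label := PySem.List.pyGetD (PySem.List.pyGetD subdata 0 []) (c - 1) 0
    let one_row := PySem.List.pyGetD subdata 0 []
    let nums := (PySem.List.pyRange 0 l 1).foldl (fun (p : Int × Int) r =>
      let rowr := PySem.List.pyGetD subdata r []
      ((if rowr = one_row then p.1 + 1 else p.1),
       (if PySem.List.pyGetD rowr (c - 1) 0 = label then p.2 + 1 else p.2))) (0, 0)
    if nums.1 = l ∨ nums.2 = l then false else split) true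

-- ===== PORT B =====
def is_cont_split_alt (subdata : List (List Int)) : Bool :=
  let first := PySem.List.pyGetD subdata 0 []
  let label := PySem.List.pyGetD first ((first.length : Int) - 1) 0
  subdata.any (fun row => PySem.List.pyGetD row ((first.length : Int) - 1) 0 != label)

-- ===== PRECONDITION & SPEC =====
-- Pre_ excludes exactly the inputs on which A raises IndexError: empty subdata, an
-- empty first row, or some row shorter than the first row.
def Pre_is_cont_split (subdata : List (List Int)) : Prop :=
  subdata ≠ [] ∧ 0 < subdata.headI.length ∧ ∀ row ∈ subdata, subdata.headI.length ≤ row.length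
instance (subdata : List (List Int)) : Decidable (Pre_is_cont_split subdata) := by
  unfold Pre_is_cont_split; infer_instance

def pvWitness_is_cont_split : List (List Int) := [[1, 2], [1, 3]]

def Spec_is_cont_split (subdata : List (List Int)) (out : Bool) : Prop := out = is_cont_split_alt subdata
instance (subdata : List (List Int)) (out : Bool) : Decidable (Spec_is_cont_split subdata out) := by unfold Spec_is_cont_split; infer_instance

-- ===== CLAIM (what is proved, stated in full; the proofs are below) =====
def Claim_equal_is_cont_split : Prop := ∀ (subdata : List (List Int)), Dom_is_cont_split subdata → Pre_is_cont_split subdata → Spec_is_cont_split subdata (is_cont_split subdata)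

-- ===== LEMMAS AND PROOFS =====

-- the inner pair-counting loop computes two countP's
theorem pv_counts (xs : List (List Int)) (p q : List Int → Prop)
    [DecidablePred p] [DecidablePred q] (a b : Int) :
    xs.foldl (fun (s : Int × Int) row =>
        ((if p row then s.1 + 1 else s.1), (if q row then s.2 + 1 else s.2))) (a, b)
      = (a + xs.countP (fun r => decide (p r)), b + xs.countP (fun r => decide (q r))) := by
  induction xs generalizing a b with
  | nil => simp
  | cons x xs ih =>
    simp only [List.foldl_cons, List.countP_cons, ih]
    by_cases hp : p x <;> by_cases hq : q x <;>
      simp [hp, hq, Prod.ext_iff] <;> omega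

theorem pv_countP_eq_length_int (xs : List (List Int)) (p : List Int → Bool) :
    ((xs.countP p : Int) = xs.length) ↔ ∀ r ∈ xs, p r := by
  rw [Int.natCast_inj (m := xs.countP p) (n := xs.length)]
  exact ⟨fun h => List.countP_eq_length.mp h, fun h => List.countP_eq_length.mpr h⟩

-- sticky-false fold over a nonempty index list
theorem pv_sticky (cond : Prop) [Decidable cond] (xs : List Int) (hne : xs ≠ []) :
    xs.foldl (fun (split : Bool) _ => if cond then false else split) true
      = !(decide cond) := by
  by_cases h : cond
  · obtain ⟨y, ys, rfl⟩ := List.exists_cons_of_ne_nil hne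
    simp only [List.foldl_cons, h, decide_true, Bool.not_true]
    induction ys with
    | nil => rfl
    | cons z zs ih => simpa [if_pos h] using ih
  · simp only [h, decide_false, Bool.not_false]
    clear hne
    induction xs with
    | nil => rfl
    | cons z zs ih => simp

-- ===== VERDICT =====
theorem is_cont_split_spec : Claim_equal_is_cont_split := by
  intro subdata _hdom hpre
  unfold Spec_is_cont_split
  obtain ⟨hne, hc, hlen⟩ := hpre
  obtain ⟨r0, rest, rfl⟩ := List.exists_cons_of_ne_nil hne
  simp only [List.headI_cons] at hc hlen
  set s := r0 :: rest with hs
  have hget0 : PySem.List.pyGetD s 0 ([] : List Int) = r0 := by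
    simp [PySem.List.pyGetD, PySem.List.pyGet?, PySem.List.pyIdx?, hs]
  unfold is_cont_split is_cont_split_alt
  simp only [hget0]
  rw [PySem.List.foldl_pyRange_zero_pyGetD' (xs := s) (d := ([] : List Int))
    (f := fun (p : Int × Int) rowr =>
      ((if rowr = r0 then p.1 + 1 else p.1),
       (if PySem.List.pyGetD rowr ((r0.length : Int) - 1) 0
           = PySem.List.pyGetD r0 ((r0.length : Int) - 1) 0 then p.2 + 1 else p.2)))]
  rw [pv_counts s (fun r => r = r0)
      (fun r => PySem.List.pyGetD r ((r0.length : Int) - 1) 0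
        = PySem.List.pyGetD r0 ((r0.length : Int) - 1) 0) 0 0]
  rw [pv_sticky _ _ (by
    intro hnil
    have hl := congrArg List.length hnil
    rw [PySem.List.length_pyRange_one] at hl
    simp [hs] at hl)]
  simp only [zero_add]
  -- condition on the A side: num1 = l ∨ num2 = l;  num1 = l implies num2 = l
  have hsub : ((s.countP (fun r => decide (r = r0)) : Int) = s.length) →
      ((s.countP (fun r => decide (PySem.List.pyGetD r ((r0.length : Int) - 1) 0
        = PySem.List.pyGetD r0 ((r0.length : Int) - 1) 0)) : Int) = s.length) := by
    intro h
    rw [pv_countP_eq_length_int] at h ⊢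
    intro r hr
    simp only [decide_eq_true_eq] at h ⊢
    rw [h r hr]
  have hcond : (((s.countP (fun r => decide (r = r0)) : Int) = s.length) ∨
      ((s.countP (fun r => decide (PySem.List.pyGetD r ((r0.length : Int) - 1) 0
        = PySem.List.pyGetD r0 ((r0.length : Int) - 1) 0)) : Int) = s.length)) ↔
      ∀ r ∈ s, PySem.List.pyGetD r ((r0.length : Int) - 1) 0
        = PySem.List.pyGetD r0 ((r0.length : Int) - 1) 0 := by
    constructor
    · rintro (h | h)
      · exact fun r hr => by
          have := (pv_countP_eq_length_int _ _).mp (hsub h) r hr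
          simpa using this
      · exact fun r hr => by
          have := (pv_countP_eq_length_int _ _).mp h r hr
          simpa using this
    · intro h
      right
      rw [pv_countP_eq_length_int]
      intro r hr; simpa using h r hr
  by_cases hall : ∀ r ∈ s, PySem.List.pyGetD r ((r0.length : Int) - 1) 0
      = PySem.List.pyGetD r0 ((r0.length : Int) - 1) 0
  · rw [decide_eq_true (hcond.mpr hall)]
    symm
    simp only [Bool.not_true, List.any_eq_false, bne_iff_ne, ne_eq, not_not]
    exact hall
  · rw [decide_eq_false (fun h => hall (hcond.mp h))]
    symm
    simp only [Bool.not_false, List.any_eq_true, bne_iff_ne, ne_eq]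
    obtain ⟨x, hx, hnex⟩ := not_forall₂.mp hall
    exact ⟨x, hx, hnex⟩
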